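-- pv_equiv track=rewrite | github.com/gregfeliu/Mexican_Immigration_Through_Restaurant_Names | src/functions.py | find_regions_for_restaurants
-- ===== SOURCE A (Python) =====
-- def find_regions_for_restaurants(rest_list, dictionary):
--     unique_rest_matches = list(set(rest_list))
--     rest_matches_w_regions = {x: {None:[]} for x in unique_rest_matches}
--     for key, value in rest_matches_w_regions.items():
--         split_item = key.split()
--         for word in split_item:
--             for key1, value1 in dictionary.items():
--                 for city in value1:
--                     if word == city:
--                         if rest_matches_w_regions[key].get(word):
--                             if [key1, city] not in rest_matches_w_regions[key][word]:
--                                 rest_matches_w_regions[key][word].append([key1, city])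
--                         else:
--                             rest_matches_w_regions[key] = {word: [[key1, city]]}
--     return rest_matches_w_regions
-- ===== SOURCE B (Python) =====
-- def find_regions_for_restaurants(rest_list, dictionary):
--     # one pass over the dictionary builds a word -> [[region, city], ...] index,
--     # then each restaurant is resolved by scanning its words in reverse with an early exit
--     index = {}
--     for region, cities in dictionary.items():
--         for city in cities:
--             entry = index.get(city, [])
--             if [region, city] not in entry:
--                 index[city] = entry + [[region, city]]
--     result = {}
--     for rest in list(set(rest_list)):
--         hit = next((w for w in reversed(rest.split()) if w in index), None)
--         result[rest] = {hit: index[hit]} if hit is not None else {None: []}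
--     return result
-- ===== Notes on version B (the rewrite author's own statement) =====
-- stated objective: faster
-- what changed: Replaces A's quadruple-nested per-restaurant scan-and-overwrite of the whole dictionary with a word-to-matches index built once over the dictionary, after which each restaurant is resolved by a reverse scan of its words with an early exit at the first (i.e. last-forward) indexed word.
import Mathlib
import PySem

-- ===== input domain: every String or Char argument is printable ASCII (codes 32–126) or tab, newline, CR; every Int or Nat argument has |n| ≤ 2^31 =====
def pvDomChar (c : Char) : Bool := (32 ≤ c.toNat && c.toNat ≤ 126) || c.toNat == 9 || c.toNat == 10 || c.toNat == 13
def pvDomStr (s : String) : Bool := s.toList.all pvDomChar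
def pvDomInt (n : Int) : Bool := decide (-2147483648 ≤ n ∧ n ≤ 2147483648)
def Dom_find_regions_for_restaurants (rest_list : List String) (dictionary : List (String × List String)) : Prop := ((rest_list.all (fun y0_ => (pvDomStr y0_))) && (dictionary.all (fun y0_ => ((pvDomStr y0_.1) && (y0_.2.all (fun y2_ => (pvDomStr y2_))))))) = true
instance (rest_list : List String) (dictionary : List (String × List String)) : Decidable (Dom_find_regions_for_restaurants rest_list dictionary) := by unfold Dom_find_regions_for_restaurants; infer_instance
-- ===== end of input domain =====

-- B replaces A's quadruple-nested per-restaurant dictionary scan by a word→matches index built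
-- once, plus a reverse early-exit scan of each restaurant's words (objective: faster).

-- ===== PORT A =====
-- Literal port of A. The Python iterates rest_matches_w_regions.items() and mutates only the
-- entry at the current key, so that entry's evolving value is threaded as `cur` and written
-- back with one insert; `rest_matches_w_regions[key][word].append(p)` is the overwrite
-- `cur.insert (some word) (l ++ [p])` of the stored list at the existing key `word`.
def find_regions_for_restaurants (rest_list : List String) (dictionary : List (String × List String)) : List (String × List (Option String × List (List String))) :=
  let dictD : PySem.Dict String (List String) := PySem.Dict.ofList dictionary
  let unique_rest_matches : List String := PySem.Set.ofList rest_list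
  let init : PySem.Dict String (PySem.Dict (Option String) (List (List String))) :=
    unique_rest_matches.foldl (fun d x => d.insert x (PySem.Dict.ofList [(none, [])])) PySem.Dict.empty
  let final : PySem.Dict String (PySem.Dict (Option String) (List (List String))) :=
    init.items.foldl (fun d kv =>
      d.insert kv.1
        ((PySem.Str.split₀ kv.1).foldl (fun cur word =>
          dictD.items.foldl (fun cur kv1 =>
            kv1.2.foldl (fun cur city =>
              if word == city then
                match cur.get? (some word) with
                | some l =>
                  if !l.isEmpty then
                    if [kv1.1, city] ∈ l then cur
                    else cur.insert (some word) (l ++ [[kv1.1, city]])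
                  else PySem.Dict.ofList [(some word, [[kv1.1, city]])]
                | none => PySem.Dict.ofList [(some word, [[kv1.1, city]])]
              else cur) cur) cur) kv.2)) init
  final.items.map (fun p => (p.1, p.2.items))

-- ===== PORT B =====
def find_regions_for_restaurants_alt (rest_list : List String) (dictionary : List (String × List String)) : List (String × List (Option String × List (List String))) :=
  let dictD : PySem.Dict String (List String) := PySem.Dict.ofList dictionary
  let index : PySem.Dict String (List (List String)) :=
    dictD.items.foldl (fun idx kv =>
      kv.2.foldl (fun idx city =>
        let entry := idx.getD city []
        if [kv.1, city] ∈ entry then idx else idx.insert city (entry ++ [[kv.1, city]])) idx)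
      PySem.Dict.empty
  let result : PySem.Dict String (PySem.Dict (Option String) (List (List String))) :=
    (PySem.Set.ofList rest_list).foldl (fun res rest =>
      res.insert rest
        (match (PySem.Str.split₀ rest).reverse.find? (fun w => index.contains w) with
         | some w => PySem.Dict.ofList [(some w, index.getD w [])]
         | none => PySem.Dict.ofList [(none, [])])) PySem.Dict.empty
  result.items.map (fun p => (p.1, p.2.items))

-- ===== PRECONDITION & SPEC =====
def Spec_find_regions_for_restaurants (rest_list : List String) (dictionary : List (String × List String)) (out : List (String × List (Option String × List (List String)))) : Prop := out = find_regions_for_restaurants_alt rest_list dictionary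
instance (rest_list : List String) (dictionary : List (String × List String)) (out : List (String × List (Option String × List (List String)))) : Decidable (Spec_find_regions_for_restaurants rest_list dictionary out) := by unfold Spec_find_regions_for_restaurants; infer_instance

-- ===== CLAIM (what is proved, stated in full; the proofs are below) =====
def Claim_equal_find_regions_for_restaurants : Prop := ∀ (rest_list : List String) (dictionary : List (String × List String)), Dom_find_regions_for_restaurants rest_list dictionary → Spec_find_regions_for_restaurants rest_list dictionary (find_regions_for_restaurants rest_list dictionary)

-- ===== LEMMAS AND PROOFS =====

-- The evolving dedup match list for a fixed word `w` over flattened (region, city) pairs.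
def pvColStep (w : String) (l : List (List String)) (p : String × String) : List (List String) :=
  if w == p.2 then (if [p.1, p.2] ∈ l then l else l ++ [[p.1, p.2]]) else l

def pvCol (w : String) (ps : List (String × String)) (l : List (List String)) : List (List String) :=
  ps.foldl (pvColStep w) l

-- A's innermost body, over a flattened (region, city) pair.
def pvAStep (w : String) (cur : PySem.Dict (Option String) (List (List String))) (p : String × String) : PySem.Dict (Option String) (List (List String)) :=
  if w == p.2 then
    match cur.get? (some w) with
    | some l =>
      if !l.isEmpty then
        if [p.1, p.2] ∈ l then cur
        else cur.insert (some w) (l ++ [[p.1, p.2]])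
      else PySem.Dict.ofList [(some w, [[p.1, p.2]])]
    | none => PySem.Dict.ofList [(some w, [[p.1, p.2]])]
  else cur

-- B's index-building body, over a flattened (region, city) pair.
def pvIdxStep (idx : PySem.Dict String (List (List String))) (p : String × String) : PySem.Dict String (List (List String)) :=
  let entry := idx.getD p.2 []
  if [p.1, p.2] ∈ entry then idx else idx.insert p.2 (entry ++ [[p.1, p.2]])

def pvFlat (dictionary : List (String × List String)) : List (String × String) :=
  (PySem.Dict.ofList dictionary).items.flatMap (fun kv => kv.2.map (fun c => (kv.1, c)))

-- the common value both ports compute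
def pvModel (rest_list : List String) (dictionary : List (String × List String)) : List (String × List (Option String × List (List String))) :=
  (PySem.Set.ofList rest_list).map (fun x =>
    (x, (match (PySem.Str.split₀ x).reverse.find? (fun w => !(pvCol w (pvFlat dictionary) []).isEmpty) with
         | some w => PySem.Dict.empty.insert (some w) (pvCol w (pvFlat dictionary) [])
         | none => PySem.Dict.ofList [((none : Option String), ([] : List (List String)))]).items))

theorem pvOfListSingleton {κ ν : Type} [BEq κ] (k : κ) (v : ν) :
    PySem.Dict.ofList [(k, v)] = PySem.Dict.empty.insert k v := rfl

-- a region/cities double loop is a single loop over the flattened (region, city) pairs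
theorem pvFoldlFlat {δ : Type} (F : δ → String × String → δ) (l : List (String × List String)) (init : δ) :
    l.foldl (fun s kv => kv.2.foldl (fun s c => F s (kv.1, c)) s) init
      = (l.flatMap (fun kv => kv.2.map (fun c => (kv.1, c)))).foldl F init := by
  induction l generalizing init with
  | nil => rfl
  | cons kv l ih =>
    simp only [List.foldl_cons, List.flatMap_cons, List.foldl_append, List.foldl_map]
    exact ih _

theorem pvColStep_ne_nil (w : String) (l : List (List String)) (p : String × String) (h : l ≠ []) :
    pvColStep w l p ≠ [] := by
  unfold pvColStep; split_ifs <;> simp [h]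

theorem pvCol_ne_nil (w : String) (ps : List (String × String)) (l : List (List String)) (h : l ≠ []) :
    pvCol w ps l ≠ [] := by
  induction ps generalizing l with
  | nil => simpa [pvCol]
  | cons p ps ih =>
    show pvCol w ps (pvColStep w l p) ≠ []
    exact ih _ (pvColStep_ne_nil w l p h)

theorem pvMem_col_self (w : String) (ps : List (String × String)) (l : List (List String)) (x : List String) (h : x ∈ l) :
    x ∈ pvCol w ps l := by
  induction ps generalizing l with
  | nil => simpa [pvCol]
  | cons p ps ih =>
    show x ∈ pvCol w ps (pvColStep w l p)
    apply ih
    unfold pvColStep; split_ifs <;> simp [h]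

theorem pvMem_col (w : String) (ps : List (String × String)) (l : List (List String)) (p : String × String) (hp : p ∈ ps) (hw : w = p.2) :
    [p.1, p.2] ∈ pvCol w ps l := by
  induction ps generalizing l with
  | nil => cases hp
  | cons q ps ih =>
    rcases List.mem_cons.mp hp with hq | hq
    · subst hq
      show [p.1, p.2] ∈ pvCol w ps (pvColStep w l p)
      apply pvMem_col_self
      subst hw
      unfold pvColStep
      simp only [BEq.rfl, if_true]
      split_ifs with hm
      · exact hm
      · simp
    · exact ih _ hq

theorem pvCol_absorb (w : String) (ps : List (String × String)) (l : List (List String)) (h : ∀ p ∈ ps, w = p.2 → [p.1, p.2] ∈ l) :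
    pvCol w ps l = l := by
  induction ps with
  | nil => rfl
  | cons q ps ih =>
    have hstep : pvColStep w l q = l := by
      unfold pvColStep
      split_ifs with h1 h2
      · rfl
      · exact absurd (h q List.mem_cons_self (by simpa using h1)) h2
      · rfl
    show pvCol w ps (pvColStep w l q) = l
    rw [hstep]
    exact ih (fun p hp => h p (List.mem_cons_of_mem _ hp))

theorem pvAFold_some (w : String) (ps : List (String × String)) (l : List (List String)) (hl : l ≠ []) :
    ps.foldl (pvAStep w) (PySem.Dict.empty.insert (some w) l) = PySem.Dict.empty.insert (some w) (pvCol w ps l) := by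
  induction ps generalizing l with
  | nil => rfl
  | cons p ps ih =>
    have hstep : pvAStep w (PySem.Dict.empty.insert (some w) l) p = PySem.Dict.empty.insert (some w) (pvColStep w l p) := by
      unfold pvAStep pvColStep
      by_cases hw : (w == p.2) = true
      · have hl' : l.isEmpty = false := by simpa [List.isEmpty_iff] using hl
        simp only [hw, if_true, PySem.Dict.get?_insert_self, hl', Bool.not_false]
        by_cases hm : [p.1, p.2] ∈ l
        · simp [hm]
        · simp [hm, PySem.Dict.insert_insert_self]
      · simp only [Bool.not_eq_true] at hw
        simp [hw]
    show List.foldl (pvAStep w) (pvAStep w (PySem.Dict.empty.insert (some w) l) p) ps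
        = PySem.Dict.empty.insert (some w) (pvCol w ps (pvColStep w l p))
    rw [hstep]
    exact ih _ (pvColStep_ne_nil w l p hl)

theorem pvAFold_none (w : String) (ps : List (String × String)) (d0 : PySem.Dict (Option String) (List (List String))) (h : d0.get? (some w) = none) :
    ps.foldl (pvAStep w) d0 = if pvCol w ps [] = [] then d0 else PySem.Dict.empty.insert (some w) (pvCol w ps []) := by
  induction ps with
  | nil => simp [pvCol]
  | cons p ps ih =>
    by_cases hw : (w == p.2) = true
    · have hstep : pvAStep w d0 p = PySem.Dict.empty.insert (some w) [[p.1, p.2]] := by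
        unfold pvAStep
        simp only [hw, if_true, h, pvOfListSingleton]
      have hcstep : pvColStep w ([] : List (List String)) p = [[p.1, p.2]] := by
        unfold pvColStep; simp [hw]
      have hne : pvCol w ps [[p.1, p.2]] ≠ [] := pvCol_ne_nil w ps _ (by simp)
      show List.foldl (pvAStep w) (pvAStep w d0 p) ps
          = if pvCol w ps (pvColStep w [] p) = [] then d0 else PySem.Dict.empty.insert (some w) (pvCol w ps (pvColStep w [] p))
      rw [hstep, hcstep, pvAFold_some w ps _ (by simp), if_neg hne]
    · have hw' : ¬ w = p.2 := by simpa using hw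
      have hstep : pvAStep w d0 p = d0 := by
        unfold pvAStep
        simp [hw']
      have hcstep : pvColStep w ([] : List (List String)) p = [] := by
        unfold pvColStep
        simp [hw']
      show List.foldl (pvAStep w) (pvAStep w d0 p) ps
          = if pvCol w ps (pvColStep w [] p) = [] then d0 else PySem.Dict.empty.insert (some w) (pvCol w ps (pvColStep w [] p))
      rw [hstep, hcstep]
      exact ih

theorem pvGet?_start (w : String) :
    (PySem.Dict.ofList [((none : Option String), ([] : List (List String)))]).get? (some w) = none := by
  rw [pvOfListSingleton, PySem.Dict.get?_insert]
  simp [PySem.Dict.get?_empty]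

theorem pvGet?_single (v w : String) (l : List (List String)) (hvw : v ≠ w) :
    (PySem.Dict.empty.insert (some v) l).get? (some w) = none := by
  rw [PySem.Dict.get?_insert]
  simp [PySem.Dict.get?_empty, Ne.symm hvw]

theorem pvWordsFold (ps : List (String × String)) (words : List String) :
    words.foldl (fun cur w => ps.foldl (pvAStep w) cur) (PySem.Dict.ofList [((none : Option String), ([] : List (List String)))])
      = match words.reverse.find? (fun w => !(pvCol w ps []).isEmpty) with
        | some w => PySem.Dict.empty.insert (some w) (pvCol w ps [])
        | none => PySem.Dict.ofList [((none : Option String), ([] : List (List String)))] := by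
  induction words using List.reverseRecOn with
  | nil => rfl
  | append_singleton ws w ih =>
    rw [List.foldl_append, List.foldl_cons, List.foldl_nil, ih, List.reverse_append,
        List.reverse_singleton, List.singleton_append]
    by_cases hw0 : pvCol w ps [] = []
    · have hpred : (!(pvCol w ps []).isEmpty) = false := by simp [hw0]
      rw [List.find?_cons]
      simp only [hpred]
      cases hfind : ws.reverse.find? (fun w => !(pvCol w ps []).isEmpty) with
      | none =>
        simp only
        rw [pvAFold_none w ps _ (pvGet?_start w), if_pos hw0]
      | some v =>
        have hv : v ≠ w := by
          intro hvw
          have hps := List.find?_some hfind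
          rw [hvw] at hps
          simp [hw0] at hps
        simp only
        rw [pvAFold_none w ps _ (pvGet?_single v w _ hv), if_pos hw0]
    · have hpred : (!(pvCol w ps []).isEmpty) = true := by simp [hw0]
      rw [List.find?_cons]
      simp only [hpred]
      cases hfind : ws.reverse.find? (fun w => !(pvCol w ps []).isEmpty) with
      | none =>
        simp only
        rw [pvAFold_none w ps _ (pvGet?_start w), if_neg hw0]
      | some v =>
        simp only
        by_cases hvw : v = w
        · subst hvw
          rw [pvAFold_some v ps _ hw0]
          rw [pvCol_absorb v ps _ (fun p hp hwp => pvMem_col v ps [] p hp hwp)]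
        · rw [pvAFold_none w ps _ (pvGet?_single v w _ hvw), if_neg hw0]

theorem pvGetD_idxFold (w : String) (ps : List (String × String)) (d : PySem.Dict String (List (List String))) :
    (ps.foldl pvIdxStep d).getD w [] = pvCol w ps (d.getD w []) := by
  induction ps generalizing d with
  | nil => rfl
  | cons p ps ih =>
    show (List.foldl pvIdxStep (pvIdxStep d p) ps).getD w [] = pvCol w ps (pvColStep w (d.getD w []) p)
    rw [ih]
    congr 1
    by_cases hm : [p.1, p.2] ∈ d.getD p.2 []
    · have e1 : pvIdxStep d p = d := by unfold pvIdxStep; simp [hm]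
      have e2 : pvColStep w (d.getD w []) p = d.getD w [] := by
        unfold pvColStep
        split_ifs with h1 h2
        · rfl
        · exact absurd (by rw [show w = p.2 by simpa using h1]; exact hm) h2
        · rfl
      rw [e1, e2]
    · have e1 : pvIdxStep d p = d.insert p.2 (d.getD p.2 [] ++ [[p.1, p.2]]) := by
        unfold pvIdxStep; simp [hm]
      rw [e1, PySem.Dict.getD_insert]
      unfold pvColStep
      by_cases hw : w = p.2
      · subst hw
        simp [hm]
      · have hbw : (w == p.2) = false := by simpa using hw
        simp [hw, hbw]

theorem pvIdx_nonempty (ps : List (String × String)) (d : PySem.Dict String (List (List String)))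
    (h : ∀ k, d.contains k = true → d.getD k [] ≠ []) :
    ∀ k, (ps.foldl pvIdxStep d).contains k = true → (ps.foldl pvIdxStep d).getD k [] ≠ [] := by
  induction ps generalizing d with
  | nil => exact h
  | cons p ps ih =>
    show ∀ k, (List.foldl pvIdxStep (pvIdxStep d p) ps).contains k = true → _
    apply ih
    intro k hk
    by_cases hm : [p.1, p.2] ∈ d.getD p.2 []
    · have e1 : pvIdxStep d p = d := by unfold pvIdxStep; simp [hm]
      rw [e1] at hk ⊢
      exact h k hk
    · have e1 : pvIdxStep d p = d.insert p.2 (d.getD p.2 [] ++ [[p.1, p.2]]) := by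
        unfold pvIdxStep; simp [hm]
      rw [e1] at hk ⊢
      rw [PySem.Dict.getD_insert]
      by_cases hkp : k = p.2
      · simp [hkp]
      · rw [if_neg hkp]
        rw [PySem.Dict.contains_insert] at hk
        have hck : d.contains k = true := by
          simpa [show (k == p.2) = false by simpa using hkp] using hk
        exact h k hck

theorem pvContains_idx (ps : List (String × String)) (w : String) :
    (ps.foldl pvIdxStep PySem.Dict.empty).contains w = !(pvCol w ps []).isEmpty := by
  have hg : (ps.foldl pvIdxStep PySem.Dict.empty).getD w [] = pvCol w ps [] := by
    simpa [PySem.Dict.getD_empty] using pvGetD_idxFold w ps PySem.Dict.empty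
  cases hc : (ps.foldl pvIdxStep PySem.Dict.empty).contains w with
  | false =>
    have hnone : (ps.foldl pvIdxStep PySem.Dict.empty).get? w = none := by
      have h2 := PySem.Dict.contains_eq_isSome_get? (ps.foldl pvIdxStep PySem.Dict.empty) w
      rw [hc] at h2
      exact Option.not_isSome_iff_eq_none.mp (by simp [← h2])
    have hnil : pvCol w ps [] = [] := by
      rw [← hg, PySem.Dict.getD_eq_get?_getD, hnone]
      rfl
    simp [hnil]
  | true =>
    have hne : (ps.foldl pvIdxStep PySem.Dict.empty).getD w [] ≠ [] := by
      apply pvIdx_nonempty ps PySem.Dict.empty _ w hc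
      intro k hk
      simp [PySem.Dict.contains_empty] at hk
    rw [hg] at hne
    simp [hne]

theorem pvFoldInsertMap {V : Type} (xs : List String) (hnd : xs.Nodup) (f : String → V) :
    (xs.foldl (fun res x => res.insert x (f x)) (PySem.Dict.empty : PySem.Dict String V)).items
      = xs.map (fun x => (x, f x)) := by
  have h := PySem.Dict.items_foldl_insert_fresh xs (fun x => x) f PySem.Dict.empty
    (fun a _ => by simp [PySem.Dict.contains_empty]) (by simpa using hnd)
  simpa using h

theorem pvItems_overwrite {V : Type} (g : String → V → V) :
    ∀ (ks pre : List (String × V)) (d : PySem.Dict String V),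
      d.items = pre ++ ks → ((pre ++ ks).map Prod.fst).Nodup →
      (ks.foldl (fun d kv => d.insert kv.1 (g kv.1 kv.2)) d).items
        = pre ++ ks.map (fun kv => (kv.1, g kv.1 kv.2)) := by
  intro ks
  induction ks with
  | nil => intro pre d hitems _; simpa using hitems
  | cons kv ks ih =>
    intro pre d hitems hnd
    have hnd2 : (pre.map Prod.fst ++ kv.1 :: ks.map Prod.fst).Nodup := by
      simpa using hnd
    obtain ⟨hnp, hnk, hdisj⟩ := List.nodup_append.mp hnd2
    have hpre : ∀ p ∈ pre, p.1 ≠ kv.1 := by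
      intro p hp hpeq
      exact hdisj _ (List.mem_map.mpr ⟨p, hp, hpeq⟩) _ List.mem_cons_self rfl
    have hks : ∀ p ∈ ks, p.1 ≠ kv.1 := by
      have hh := (List.nodup_cons.mp hnk).1
      intro p hp hpeq
      exact hh (List.mem_map.mpr ⟨p, hp, hpeq⟩)
    have hcont : d.contains kv.1 = true := by
      rw [PySem.Dict.contains_iff_mem_keys]
      simp [PySem.Dict.keys, hitems]
    have hins : (d.insert kv.1 (g kv.1 kv.2)).items = pre ++ (kv.1, g kv.1 kv.2) :: ks := by
      rw [PySem.Dict.items_insert_of_contains d (g kv.1 kv.2) hcont, hitems,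
          List.map_append, List.map_cons]
      congr 1
      · conv_rhs => rw [← List.map_id pre]
        apply List.map_congr_left
        intro p hp
        simp [hpre p hp]
      · congr 1
        · simp
        · conv_rhs => rw [← List.map_id ks]
          apply List.map_congr_left
          intro p hp
          simp [hks p hp]
    rw [List.foldl_cons]
    have hrec := ih (pre ++ [(kv.1, g kv.1 kv.2)]) (d.insert kv.1 (g kv.1 kv.2))
      (by rw [hins]; simp) (by simpa using hnd2)
    rw [hrec]
    simp

theorem pvB_eq_model (rest_list : List String) (dictionary : List (String × List String)) :
    find_regions_for_restaurants_alt rest_list dictionary = pvModel rest_list dictionary := by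
  show ((PySem.Set.ofList rest_list).foldl
      (fun (res : PySem.Dict String (PySem.Dict (Option String) (List (List String)))) (rest : String) =>
        res.insert rest
        (match (PySem.Str.split₀ rest).reverse.find?
            (fun w => ((PySem.Dict.ofList dictionary).items.foldl
              (fun (idx : PySem.Dict String (List (List String))) (kv : String × List String) =>
                kv.2.foldl (fun idx c => pvIdxStep idx (kv.1, c)) idx)
              PySem.Dict.empty).contains w) with
          | some w => PySem.Dict.ofList [(some w, ((PySem.Dict.ofList dictionary).items.foldl
              (fun (idx : PySem.Dict String (List (List String))) (kv : String × List String) =>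
                kv.2.foldl (fun idx c => pvIdxStep idx (kv.1, c)) idx)
              PySem.Dict.empty).getD w [])]
          | none => PySem.Dict.ofList [((none : Option String), ([] : List (List String)))]))
      PySem.Dict.empty).items.map
      (fun (p : String × PySem.Dict (Option String) (List (List String))) => (p.1, p.2.items))
    = pvModel rest_list dictionary
  have hB : ((PySem.Set.ofList rest_list).foldl
      (fun (res : PySem.Dict String (PySem.Dict (Option String) (List (List String)))) (rest : String) =>
        res.insert rest
        (match (PySem.Str.split₀ rest).reverse.find?
            (fun w => ((PySem.Dict.ofList dictionary).items.foldl
              (fun (idx : PySem.Dict String (List (List String))) (kv : String × List String) =>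
                kv.2.foldl (fun idx c => pvIdxStep idx (kv.1, c)) idx)
              PySem.Dict.empty).contains w) with
          | some w => PySem.Dict.ofList [(some w, ((PySem.Dict.ofList dictionary).items.foldl
              (fun (idx : PySem.Dict String (List (List String))) (kv : String × List String) =>
                kv.2.foldl (fun idx c => pvIdxStep idx (kv.1, c)) idx)
              PySem.Dict.empty).getD w [])]
          | none => PySem.Dict.ofList [((none : Option String), ([] : List (List String)))]))
      PySem.Dict.empty).items
      = (PySem.Set.ofList rest_list).map (fun rest =>
        (rest, (match (PySem.Str.split₀ rest).reverse.find?
            (fun w => ((PySem.Dict.ofList dictionary).items.foldl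
              (fun (idx : PySem.Dict String (List (List String))) (kv : String × List String) =>
                kv.2.foldl (fun idx c => pvIdxStep idx (kv.1, c)) idx)
              PySem.Dict.empty).contains w) with
          | some w => PySem.Dict.ofList [(some w, ((PySem.Dict.ofList dictionary).items.foldl
              (fun (idx : PySem.Dict String (List (List String))) (kv : String × List String) =>
                kv.2.foldl (fun idx c => pvIdxStep idx (kv.1, c)) idx)
              PySem.Dict.empty).getD w [])]
          | none => PySem.Dict.ofList [((none : Option String), ([] : List (List String)))]))) :=
    pvFoldInsertMap _ (PySem.Set.nodup_ofList _) _
  rw [hB, List.map_map]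
  unfold pvModel
  apply List.map_congr_left
  intro x _
  simp only [Function.comp]
  have hidx : (PySem.Dict.ofList dictionary).items.foldl
      (fun (idx : PySem.Dict String (List (List String))) (kv : String × List String) =>
        kv.2.foldl (fun idx c => pvIdxStep idx (kv.1, c)) idx) PySem.Dict.empty
      = (pvFlat dictionary).foldl pvIdxStep PySem.Dict.empty :=
    pvFoldlFlat pvIdxStep _ _
  rw [hidx]
  have hpred : (fun w => ((pvFlat dictionary).foldl pvIdxStep PySem.Dict.empty).contains w)
      = (fun w => !(pvCol w (pvFlat dictionary) []).isEmpty) :=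
    funext (fun w => pvContains_idx (pvFlat dictionary) w)
  rw [hpred]
  cases hfind : (PySem.Str.split₀ x).reverse.find? (fun w => !(pvCol w (pvFlat dictionary) []).isEmpty) with
  | none => rfl
  | some w =>
    have hget : ((pvFlat dictionary).foldl pvIdxStep PySem.Dict.empty).getD w []
        = pvCol w (pvFlat dictionary) [] := by
      simpa [PySem.Dict.getD_empty] using pvGetD_idxFold w (pvFlat dictionary) PySem.Dict.empty
    simp only [hget, pvOfListSingleton]

theorem pvA_eq_model (rest_list : List String) (dictionary : List (String × List String)) :
    find_regions_for_restaurants rest_list dictionary = pvModel rest_list dictionary := by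
  show (((PySem.Set.ofList rest_list).foldl
        (fun (d : PySem.Dict String (PySem.Dict (Option String) (List (List String)))) (x : String) =>
          d.insert x (PySem.Dict.ofList [((none : Option String), ([] : List (List String)))]))
        PySem.Dict.empty).items.foldl
      (fun (d : PySem.Dict String (PySem.Dict (Option String) (List (List String))))
           (kv : String × PySem.Dict (Option String) (List (List String))) =>
        d.insert kv.1 ((PySem.Str.split₀ kv.1).foldl
        (fun cur word => (PySem.Dict.ofList dictionary).items.foldl
          (fun (cur : PySem.Dict (Option String) (List (List String))) (kv1 : String × List String) =>
            kv1.2.foldl (fun cur city => pvAStep word cur (kv1.1, city)) cur) cur)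
        kv.2))
      ((PySem.Set.ofList rest_list).foldl
        (fun (d : PySem.Dict String (PySem.Dict (Option String) (List (List String)))) (x : String) =>
          d.insert x (PySem.Dict.ofList [((none : Option String), ([] : List (List String)))]))
        PySem.Dict.empty)).items.map
      (fun (p : String × PySem.Dict (Option String) (List (List String))) => (p.1, p.2.items))
    = pvModel rest_list dictionary
  have hinit : ((PySem.Set.ofList rest_list).foldl
      (fun (d : PySem.Dict String (PySem.Dict (Option String) (List (List String)))) (x : String) =>
        d.insert x (PySem.Dict.ofList [((none : Option String), ([] : List (List String)))]))
      PySem.Dict.empty).items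
      = (PySem.Set.ofList rest_list).map
          (fun x => (x, PySem.Dict.ofList [((none : Option String), ([] : List (List String)))])) :=
    pvFoldInsertMap _ (PySem.Set.nodup_ofList _) _
  have hover := pvItems_overwrite
    (fun key v => (PySem.Str.split₀ key).foldl
      (fun cur word => (PySem.Dict.ofList dictionary).items.foldl
        (fun (cur : PySem.Dict (Option String) (List (List String))) (kv1 : String × List String) =>
          kv1.2.foldl (fun cur city => pvAStep word cur (kv1.1, city)) cur) cur) v)
    (((PySem.Set.ofList rest_list).foldl
        (fun (d : PySem.Dict String (PySem.Dict (Option String) (List (List String)))) (x : String) =>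
          d.insert x (PySem.Dict.ofList [((none : Option String), ([] : List (List String)))]))
        PySem.Dict.empty).items)
    []
    ((PySem.Set.ofList rest_list).foldl
        (fun (d : PySem.Dict String (PySem.Dict (Option String) (List (List String)))) (x : String) =>
          d.insert x (PySem.Dict.ofList [((none : Option String), ([] : List (List String)))]))
        PySem.Dict.empty)
    (by simp)
    (by rw [hinit]
        simp only [List.nil_append, List.map_map]
        rw [show (Prod.fst ∘ fun (x : String) => (x, PySem.Dict.ofList [((none : Option String), ([] : List (List String)))])) = id from rfl, List.map_id]
        exact PySem.Set.nodup_ofList _)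
  rw [hover, hinit, List.nil_append, List.map_map, List.map_map]
  unfold pvModel
  apply List.map_congr_left
  intro x _
  simp only [Function.comp]
  have hconv : (fun cur word => (PySem.Dict.ofList dictionary).items.foldl
      (fun (cur : PySem.Dict (Option String) (List (List String))) (kv1 : String × List String) =>
        kv1.2.foldl (fun cur city => pvAStep word cur (kv1.1, city)) cur) cur)
      = (fun (cur : PySem.Dict (Option String) (List (List String))) (word : String) =>
          (pvFlat dictionary).foldl (pvAStep word) cur) :=
    funext (fun cur => funext (fun word => pvFoldlFlat (pvAStep word) _ cur))
  rw [hconv, pvWordsFold (pvFlat dictionary) (PySem.Str.split₀ x)]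

-- ===== VERDICT (by name: the statement is the Claim_ definition above) =====
theorem find_regions_for_restaurants_spec : Claim_equal_find_regions_for_restaurants := by
  intro rest_list dictionary _
  unfold Spec_find_regions_for_restaurants
  rw [pvA_eq_model, pvB_eq_model]
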